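-- pv_equiv track=rewrite | github.com/GiaccomoU/GiaccomoUbaldo-IA-117 | proyecto1/taxi.py | insertarEntre
-- ===== SOURCE A (Python) =====
-- def insertarEntre(lista, elementos, pos):
--     nuevaLista = []
--     for i in range(0, len(lista)):
--         nuevaLista.append(lista[i])
--         if i == pos:
--             for elemento in elementos:
--                 nuevaLista.append(elemento)
--     return nuevaLista
-- ===== SOURCE B (Python) =====
-- def insertarEntre(lista, elementos, pos):
--     # Slice concatenation instead of an index loop with conditional appends.
--     if 0 <= pos < len(lista):
--         return list(lista[:pos + 1]) + list(elementos) + list(lista[pos + 1:])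
--     return list(lista)
-- ===== Notes on version B (the rewrite author's own statement) =====
-- stated objective: simpler
-- what changed: Replaces the index loop with conditional inner appends by a single guarded slice concatenation lista[:pos+1] + elementos + lista[pos+1:], falling back to a plain copy when pos is out of range.
import Mathlib
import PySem

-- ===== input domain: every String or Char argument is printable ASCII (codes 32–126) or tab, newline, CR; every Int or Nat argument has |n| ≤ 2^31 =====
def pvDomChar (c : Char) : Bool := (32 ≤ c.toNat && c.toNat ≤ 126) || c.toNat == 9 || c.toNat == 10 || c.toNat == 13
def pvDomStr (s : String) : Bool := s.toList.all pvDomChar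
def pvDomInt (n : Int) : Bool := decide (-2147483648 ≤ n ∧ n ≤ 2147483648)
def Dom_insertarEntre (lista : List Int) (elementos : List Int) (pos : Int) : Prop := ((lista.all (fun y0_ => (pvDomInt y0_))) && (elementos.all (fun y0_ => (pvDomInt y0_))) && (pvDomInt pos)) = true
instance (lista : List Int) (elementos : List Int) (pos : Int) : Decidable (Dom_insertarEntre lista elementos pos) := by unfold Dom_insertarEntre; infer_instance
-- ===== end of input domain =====

-- B replaces A's index loop with conditional inner appends by a guarded slice concatenation (simpler decomposition).


-- ===== PORT A =====
-- for i in range(0, len(lista)): append lista[i]; if i == pos: append each elemento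
def insertarEntre (lista : List Int) (elementos : List Int) (pos : Int) : List Int :=
  (PySem.List.pyRange 0 (lista.length : Int)).foldl
    (fun nuevaLista i =>
      let nuevaLista := nuevaLista ++ [PySem.List.pyGetD lista i 0]
      if i == pos then nuevaLista ++ elementos else nuevaLista) []

-- ===== PORT B =====
-- if 0 <= pos < len(lista): lista[:pos+1] + elementos + lista[pos+1:]; else a copy of lista
def insertarEntre_alt (lista : List Int) (elementos : List Int) (pos : Int) : List Int :=
  if 0 ≤ pos ∧ pos < (lista.length : Int) then
    PySem.List.slice lista none (some (pos + 1)) ++ elementos ++ PySem.List.slice lista (some (pos + 1)) none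
  else lista

-- ===== PRECONDITION & SPEC =====
def Spec_insertarEntre (lista : List Int) (elementos : List Int) (pos : Int) (out : List Int) : Prop := out = insertarEntre_alt lista elementos pos
instance (lista : List Int) (elementos : List Int) (pos : Int) (out : List Int) : Decidable (Spec_insertarEntre lista elementos pos out) := by unfold Spec_insertarEntre; infer_instance

-- ===== CLAIM (what is proved, stated in full; the proofs are below) =====
def Claim_equal_insertarEntre : Prop := ∀ (lista : List Int) (elementos : List Int) (pos : Int), Dom_insertarEntre lista elementos pos → Spec_insertarEntre lista elementos pos (insertarEntre lista elementos pos)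

-- ===== LEMMAS AND PROOFS =====

-- loop invariant: after processing indices 0..n-1 the accumulator is the insertion result restricted to lista.take n
theorem insertarEntre_loop_eq (lista elementos : List Int) (pos : Int) (n : Nat) (hn : n ≤ lista.length) :
    (PySem.List.pyRange 0 (n : Int)).foldl
      (fun nuevaLista i =>
        let nuevaLista := nuevaLista ++ [PySem.List.pyGetD lista i 0]
        if i == pos then nuevaLista ++ elementos else nuevaLista) [] =
    if 0 ≤ pos ∧ pos < (n : Int) then
      lista.take (pos.toNat + 1) ++ elementos ++ (lista.take n).drop (pos.toNat + 1)
    else lista.take n := by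
  induction n with
  | zero => simp [PySem.List.pyRange]
  | succ k ih =>
    have hk : k < lista.length := by omega
    have hstep : ((k : Nat) : Int) + 1 = ((k + 1 : Nat) : Int) := by push_cast; ring
    rw [show ((k + 1 : Nat) : Int) = (k : Int) + 1 by push_cast; ring,
        PySem.List.pyRange_one_succ_right (by positivity), List.foldl_append,
        ih (by omega)]
    simp only [List.foldl_cons, List.foldl_nil]
    have hget : PySem.List.pyGetD lista ((k : Nat) : Int) 0 = lista.getD k 0 :=
      PySem.List.pyGetD_natCast lista k 0
    have hgetE : lista.getD k 0 = lista[k] := by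
      simp [List.getD_eq_getElem?_getD, List.getElem?_eq_getElem hk]
    have htake : lista.take (k + 1) = lista.take k ++ [lista[k]] := by
      rw [List.take_succ]; simp [List.getElem?_eq_getElem hk]
    by_cases hpos : 0 ≤ pos ∧ pos < (k : Int)
    · -- already inserted; i = k ≠ pos
      have hne : ¬ ((((k : Nat) : Int)) == pos) = true := by
        simpa using (by omega : ((k : Nat) : Int) ≠ pos)
      rw [if_pos hpos, if_neg hne,
          if_pos (show 0 ≤ pos ∧ pos < (k : Int) + 1 by omega),
          hget, hgetE, htake,
          List.drop_append_of_le_length (by simp; omega)]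
      simp
    · by_cases heq : ((k : Nat) : Int) = pos
      · -- i = pos: insert now
        have hpt : pos.toNat = k := by omega
        have hbeq : ((((k : Nat) : Int)) == pos) = true := by simpa using heq
        have hdrop : (lista.take (k + 1)).drop (k + 1) = [] := by simp
        rw [if_neg hpos, if_pos hbeq,
            if_pos (show 0 ≤ pos ∧ pos < (k : Int) + 1 by omega),
            hget, hgetE, hpt, ← htake, hdrop]
        simp
      · -- pos not yet (or never) reached
        have hne : ¬ ((((k : Nat) : Int)) == pos) = true := by simpa using heq
        rw [if_neg hpos, if_neg hne,
            if_neg (show ¬ (0 ≤ pos ∧ pos < (k : Int) + 1) by omega),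
            hget, hgetE, htake]

-- ===== VERDICT (by name: the statement is the Claim_ definition above) =====
theorem insertarEntre_spec : Claim_equal_insertarEntre := by
  intro lista elementos pos _
  unfold Spec_insertarEntre insertarEntre insertarEntre_alt
  rw [insertarEntre_loop_eq lista elementos pos lista.length le_rfl]
  by_cases h : 0 ≤ pos ∧ pos < (lista.length : Int)
  · rw [if_pos h, if_pos h]
    rw [PySem.List.slice_to lista (by omega : (0:Int) ≤ pos + 1),
        PySem.List.slice_from lista (by omega : (0:Int) ≤ pos + 1)]
    have : (pos + 1).toNat = pos.toNat + 1 := by omega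
    rw [this, List.take_length]
  · rw [if_neg h, if_neg h, List.take_length]
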